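-- pv_equiv track=rewrite | github.com/bitsandbytes-foundation/bitsandbytes | bitsandbytes/pipeline.py | split_model_layers
-- ===== SOURCE A (Python) =====
-- def split_model_layers(layers, num_stages):
--     """Split a list of layers evenly across stages.
--
--     Args:
--         layers: List of nn.Module layers.
--         num_stages: Number of pipeline stages.
--
--     Returns:
--         List of lists: stage_layers[stage_id] = [layer1, layer2, ...]
--     """
--     n = len(layers)
--     assert n >= num_stages, (
--         f"Cannot split {n} layers into {num_stages} stages"
--     )
--
--     # Even split with remainder going to earlier stages
--     base = n // num_stages
--     remainder = n % num_stages
--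
--     stage_layers = []
--     idx = 0
--     for s in range(num_stages):
--         count = base + (1 if s < remainder else 0)
--         stage_layers.append(layers[idx:idx + count])
--         idx += count
--
--     return stage_layers
-- ===== SOURCE B (Python) =====
-- def split_model_layers(layers, num_stages):
--     """Split a list of layers evenly across stages (remainder to earlier stages)."""
--     n = len(layers)
--     assert n >= num_stages, (
--         f"Cannot split {n} layers into {num_stages} stages"
--     )
--     base, rem = divmod(n, num_stages)
--     # stage s starts at closed-form boundary s*base + min(s, rem)
--     return [
--         layers[s * base + min(s, rem) : (s + 1) * base + min(s + 1, rem)]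
--         for s in range(num_stages)
--     ]
-- ===== Notes on version B (the rewrite author's own statement) =====
-- stated objective: simpler
-- what changed: Replaced the accumulator loop carrying a running index and per-stage count branch by a single comprehension that slices at the closed-form stage boundary s*base + min(s, rem).
import Mathlib
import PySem

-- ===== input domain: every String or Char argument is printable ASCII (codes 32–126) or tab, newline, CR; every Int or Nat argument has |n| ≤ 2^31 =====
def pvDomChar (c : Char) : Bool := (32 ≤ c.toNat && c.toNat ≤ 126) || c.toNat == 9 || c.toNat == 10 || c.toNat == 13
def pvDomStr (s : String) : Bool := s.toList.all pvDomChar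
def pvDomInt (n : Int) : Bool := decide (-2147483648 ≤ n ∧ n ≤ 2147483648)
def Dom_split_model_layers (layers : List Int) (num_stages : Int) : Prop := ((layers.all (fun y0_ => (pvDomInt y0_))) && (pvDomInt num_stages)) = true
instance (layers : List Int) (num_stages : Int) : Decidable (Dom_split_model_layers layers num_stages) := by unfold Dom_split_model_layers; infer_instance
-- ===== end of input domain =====

-- B replaces A's running-index accumulator loop by a comprehension slicing at the
-- closed-form boundary s*base + min(s, rem); same cost, simpler shape.

-- ===== PORT A =====
def split_model_layers (layers : List Int) (num_stages : Int) : List (List Int) :=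
  let n : Int := layers.length
  let base := PySem.Int.floordiv n num_stages
  let remainder := PySem.Int.mod n num_stages
  ((PySem.List.pyRange 0 num_stages 1).foldl
    (fun (st : List (List Int) × Int) s =>
      let count := base + (if s < remainder then (1 : Int) else 0)
      (st.1 ++ [PySem.List.slice layers (some st.2) (some (st.2 + count))], st.2 + count))
    ([], 0)).1

-- ===== PORT B =====
def split_model_layers_alt (layers : List Int) (num_stages : Int) : List (List Int) :=
  let n : Int := layers.length
  let base := PySem.Int.floordiv n num_stages
  let rem := PySem.Int.mod n num_stages
  (PySem.List.pyRange 0 num_stages 1).map (fun s =>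
    PySem.List.slice layers (some (s * base + min s rem))
                            (some ((s + 1) * base + min (s + 1) rem)))

-- ===== PRECONDITION & SPEC =====
-- Pre_ excludes exactly the inputs where both Pythons raise: num_stages = 0 (ZeroDivisionError)
-- and len(layers) < num_stages (AssertionError).
def Pre_split_model_layers (layers : List Int) (num_stages : Int) : Prop :=
  num_stages ≠ 0 ∧ num_stages ≤ (layers.length : Int)
instance (layers : List Int) (num_stages : Int) : Decidable (Pre_split_model_layers layers num_stages) := by unfold Pre_split_model_layers; infer_instance
def pvWitness_split_model_layers : List Int × Int := ([1, 2, 3, 4, 5], 2)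
def Spec_split_model_layers (layers : List Int) (num_stages : Int) (out : List (List Int)) : Prop := out = split_model_layers_alt layers num_stages
instance (layers : List Int) (num_stages : Int) (out : List (List Int)) : Decidable (Spec_split_model_layers layers num_stages out) := by unfold Spec_split_model_layers; infer_instance

-- ===== CLAIM (what is proved, stated in full; the proofs are below) =====
def Claim_equal_split_model_layers : Prop := ∀ (layers : List Int) (num_stages : Int), Dom_split_model_layers layers num_stages → Pre_split_model_layers layers num_stages → Spec_split_model_layers layers num_stages (split_model_layers layers num_stages)

-- ===== LEMMAS AND PROOFS =====

-- start boundary used by B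
def pvStart (base rem s : Int) : Int := s * base + min s rem

lemma pvStart_step (base rem s : Int) :
    pvStart base rem s + (base + (if s < rem then (1 : Int) else 0)) = pvStart base rem (s + 1) := by
  unfold pvStart
  have : (s + 1) * base = s * base + base := by ring
  rw [this]
  rcases lt_or_ge s rem with h | h
  · simp [h, min_eq_left (by omega : s ≤ rem)]
    omega
  · simp [not_lt.mpr h, min_eq_right h, min_eq_right (by omega : rem ≤ s + 1)]
    omega

-- fold invariant: starting from index pvStart base rem a, the fold over pyRange a m 1
-- appends exactly B's slices.
lemma pv_fold_inv (layers : List Int) (base rem : Int) :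
    ∀ (k : Nat) (a m : Int), (m - a).toNat = k →
    ∀ (acc : List (List Int)) (idx : Int), idx = pvStart base rem a →
    ((PySem.List.pyRange a m 1).foldl
      (fun (st : List (List Int) × Int) s =>
        let count := base + (if s < rem then (1 : Int) else 0)
        (st.1 ++ [PySem.List.slice layers (some st.2) (some (st.2 + count))], st.2 + count))
      (acc, idx)).1
    = acc ++ (PySem.List.pyRange a m 1).map (fun s =>
        PySem.List.slice layers (some (pvStart base rem s)) (some (pvStart base rem (s + 1)))) := by
  intro k
  induction k with
  | zero =>
    intro a m hk acc idx hidx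
    rw [PySem.List.pyRange_one_eq_nil (by omega)]
    simp
  | succ k ih =>
    intro a m hk acc idx hidx
    subst hidx
    have hab : a < m := by omega
    rw [PySem.List.pyRange_one_cons hab]
    simp only [List.foldl_cons, List.map_cons]
    rw [pvStart_step base rem a]
    rw [ih (a + 1) m (by omega) _ _ rfl]
    simp

theorem split_model_layers_spec : Claim_equal_split_model_layers := by
  intro layers num_stages _ _
  unfold Spec_split_model_layers split_model_layers split_model_layers_alt
  simp only []
  rcases lt_or_ge 0 num_stages with hpos | hneg
  · have hrem : 0 ≤ PySem.Int.mod (layers.length : Int) num_stages := by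
      rw [PySem.Int.mod_eq_emod_of_pos hpos]
      exact Int.emod_nonneg _ (by omega)
    rw [pv_fold_inv layers _ _ (num_stages - 0).toNat 0 num_stages rfl [] 0
        (by simp [pvStart]; omega)]
    simp [pvStart]
  · rw [PySem.List.pyRange_one_eq_nil (by omega)]
    simp
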